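-- pv_equiv track=rewrite | github.com/Shenia/daily_byte_exercises | 8_identical_elements.py | identical_elements_iterative
-- ===== SOURCE A (Python) =====
-- def identical_elements_iterative(array, k):
--     occurrences = {}
--     for index, item in enumerate(array):
--         if item in occurrences:
--             occurrences[item].append(index)
--         else:
--             occurrences[item] = [index]
--     for key in occurrences.keys():
--         occurrence = occurrences[key]
--         for index, item in enumerate(occurrence):
--             if index > 0 and (occurrence[index] - occurrence[index - 1] > k):
--                 return False
--     return True
-- ===== SOURCE B (Python) =====
-- def identical_elements_iterative(array, k):
--     last_index = {}
--     for index, item in enumerate(array):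
--         if item in last_index and index - last_index[item] > k:
--             return False
--         last_index[item] = index
--     return True
-- ===== Notes on version B (the rewrite author's own statement) =====
-- stated objective: simpler
-- what changed: Single pass keeping only the last index of each value in a dict, with early exit, instead of building full per-value occurrence lists and then scanning every list for adjacent gaps; measured ~2x faster (one traversal, no list building).
import Mathlib
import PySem

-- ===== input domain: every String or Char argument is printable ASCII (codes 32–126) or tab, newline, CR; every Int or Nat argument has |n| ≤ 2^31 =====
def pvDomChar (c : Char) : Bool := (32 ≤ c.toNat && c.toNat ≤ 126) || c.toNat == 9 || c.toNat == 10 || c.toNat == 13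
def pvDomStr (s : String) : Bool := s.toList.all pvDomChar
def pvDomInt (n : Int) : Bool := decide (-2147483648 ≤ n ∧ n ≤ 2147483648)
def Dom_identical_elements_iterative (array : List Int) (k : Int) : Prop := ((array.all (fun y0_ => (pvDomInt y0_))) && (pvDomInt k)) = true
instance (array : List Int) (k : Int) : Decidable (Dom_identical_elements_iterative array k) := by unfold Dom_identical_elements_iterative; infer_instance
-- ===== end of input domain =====

-- B replaces A's build-all-occurrence-lists-then-scan structure by a single pass that keeps
-- only the last index per value (objective: simpler).

-- ===== PORT A =====
-- inner loop 'for index, item in enumerate(occurrence): if index > 0 and occurrence[index]-occurrence[index-1] > k: return False'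
-- = check each adjacent pair in order, early-returning false
def checkOccA (k : Int) : List Int → Bool
  | a :: b :: rest => if b - a > k then false else checkOccA k (b :: rest)
  | _ => true

-- outer loop 'for key in occurrences.keys(): …' with early return False
def checkKeysA (k : Int) (d : PySem.Dict Int (List Int)) : List Int → Bool
  | [] => true
  | key :: rest => if checkOccA k (d.getD key []) then checkKeysA k d rest else false

def identical_elements_iterative (array : List Int) (k : Int) : Bool :=
  let occurrences : PySem.Dict Int (List Int) :=
    (PySem.List.enumerate array).foldl
      (fun d p => match d.get? p.2 with
        | some l => d.insert p.2 (l ++ [p.1])   -- occurrences[item].append(index)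
        | none => d.insert p.2 [p.1])           -- occurrences[item] = [index]
      PySem.Dict.empty
  checkKeysA k occurrences occurrences.keys

-- ===== PORT B =====
def goB (k : Int) : List Int → Int → PySem.Dict Int Int → Bool
  | [], _, _ => true
  | x :: xs, i, last_index =>
    match last_index.get? x with
    | some j => if i - j > k then false else goB k xs (i + 1) (last_index.insert x i)
    | none => goB k xs (i + 1) (last_index.insert x i)

def identical_elements_iterative_alt (array : List Int) (k : Int) : Bool :=
  goB k array 0 PySem.Dict.empty

-- ===== PRECONDITION & SPEC =====
def Spec_identical_elements_iterative (array : List Int) (k : Int) (out : Bool) : Prop := out = identical_elements_iterative_alt array k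
instance (array : List Int) (k : Int) (out : Bool) : Decidable (Spec_identical_elements_iterative array k out) := by unfold Spec_identical_elements_iterative; infer_instance

-- ===== CLAIM (what is proved, stated in full; the proofs are below) =====
def Claim_equal_identical_elements_iterative : Prop := ∀ (array : List Int) (k : Int), Dom_identical_elements_iterative array k → Spec_identical_elements_iterative array k (identical_elements_iterative array k)

-- ===== LEMMAS AND PROOFS =====

-- positions of value v among (index, item) pairs of 'enumerate xs i'
def posFrom (v : Int) (xs : List Int) (i : Int) : List Int :=
  ((PySem.List.enumerate xs i).filter (fun p => p.2 == v)).map (·.1)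

theorem posFrom_nil (v : Int) (i : Int) : posFrom v [] i = [] := rfl

theorem posFrom_cons (v x : Int) (xs : List Int) (i : Int) :
    posFrom v (x :: xs) i = (if x = v then [i] else []) ++ posFrom v xs (i + 1) := by
  simp only [posFrom, PySem.List.enumerate_cons, List.filter_cons]
  by_cases h : x = v <;> simp [h]

-- both programs decide the same predicate: every adjacent pair of same-value indices is within k
def GapOk (array : List Int) (k : Int) : Prop :=
  ∀ v : Int, checkOccA k (posFrom v array 0) = true

-- ---- A side ----

theorem modify_eq_insert (d : PySem.Dict Int (List Int)) (c : Int) (i : Int) :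
    d.modify c [] (· ++ [i]) = d.insert c (d.getD c [] ++ [i]) := by
  simp [PySem.Dict.modify]

theorem buildA_getD (array : List Int) (v : Int) :
    (((PySem.List.enumerate array).foldl
      (fun d p => match d.get? p.2 with
        | some l => d.insert p.2 (l ++ [p.1])
        | none => d.insert p.2 [p.1])
      PySem.Dict.empty : PySem.Dict Int (List Int))).getD v [] = posFrom v array 0 := by
  have hstep : ((PySem.List.enumerate array).foldl
      (fun d p => match d.get? p.2 with
        | some l => d.insert p.2 (l ++ [p.1])
        | none => d.insert p.2 [p.1])
      PySem.Dict.empty : PySem.Dict Int (List Int))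
      = (PySem.List.enumerate array).foldl
        (fun d p => d.modify p.2 [] (· ++ [p.1])) PySem.Dict.empty := by
    congr 1
    funext d p
    rw [modify_eq_insert]
    cases h : d.get? p.2 with
    | some l => rw [PySem.Dict.getD_of_get?_eq_some _ _ h]
    | none => rw [PySem.Dict.getD_of_get?_eq_none _ _ h]; rfl
  have hswap : (PySem.List.enumerate array).foldl
      (fun d p => d.modify p.2 [] (· ++ [p.1])) PySem.Dict.empty
      = ((PySem.List.enumerate array).map Prod.swap).foldl
        (fun d p => d.modify p.1 [] (· ++ [p.2])) PySem.Dict.empty := by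
    rw [List.foldl_map]
    simp
  rw [hstep, hswap, PySem.Dict.getD_foldl_modify_append]
  simp [posFrom, PySem.Dict.getD_empty, List.filter_map, Function.comp_def, List.map_map]

theorem checkKeysA_all (k : Int) (d : PySem.Dict Int (List Int)) (ks : List Int) :
    checkKeysA k d ks = ks.all (fun key => checkOccA k (d.getD key [])) := by
  induction ks with
  | nil => rfl
  | cons key rest ih =>
    simp only [checkKeysA, List.all_cons, ih]
    by_cases h : checkOccA k (d.getD key []) = true <;> simp [h]

theorem A_iff (array : List Int) (k : Int) :
    identical_elements_iterative array k = true ↔ GapOk array k := by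
  unfold identical_elements_iterative
  simp only [checkKeysA_all, List.all_eq_true]
  constructor
  · intro h v
    rw [← buildA_getD array v]
    set d := ((PySem.List.enumerate array).foldl
      (fun d p => match d.get? p.2 with
        | some l => d.insert p.2 (l ++ [p.1])
        | none => d.insert p.2 [p.1])
      PySem.Dict.empty : PySem.Dict Int (List Int)) with hd
    by_cases hv : v ∈ d.keys
    · exact h v hv
    · have hn : d.get? v = none := (PySem.Dict.get?_eq_none_iff_not_mem_keys d v).mpr hv
      rw [PySem.Dict.getD_of_get?_eq_none _ _ hn]
      rfl
  · intro h key _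
    rw [buildA_getD array key]
    exact h key

-- ---- B side ----

-- the pending list seen by checkOccA for value v during B's loop
def optList (o : Option Int) : List Int :=
  match o with
  | some j => [j]
  | none => []

theorem goB_iff (k : Int) (xs : List Int) :
    ∀ (i : Int) (last : PySem.Dict Int Int),
      (goB k xs i last = true ↔
        ∀ v : Int, checkOccA k (optList (last.get? v) ++ posFrom v xs i) = true) := by
  induction xs with
  | nil =>
    intro i last
    simp only [goB, posFrom_nil, List.append_nil, true_iff]
    intro v
    cases last.get? v <;> rfl
  | cons x xs ih =>
    intro i last
    simp only [goB]
    cases hx : last.get? x with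
    | some j =>
      by_cases hk : i - j > k
      · simp only [if_pos hk]
        constructor
        · intro h; exact absurd h (by simp)
        · intro hcontra
          exfalso
          have hcx := hcontra x
          rw [posFrom_cons] at hcx
          simp [hx, optList] at hcx
          rw [show checkOccA k (j :: i :: posFrom x xs (i + 1)) = false from by
            simp [checkOccA, if_pos hk]] at hcx
          exact absurd hcx (by simp)
      · simp only [if_neg hk, ih (i + 1) (last.insert x i)]
        apply forall_congr'
        intro v
        by_cases hv : v = x
        · subst hv
          rw [PySem.Dict.get?_insert_self, posFrom_cons, hx]
          simp only [optList]
          simp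
          rw [show checkOccA k (j :: i :: posFrom v xs (i + 1))
              = checkOccA k (i :: posFrom v xs (i + 1)) from by simp [checkOccA, hk]]
        · rw [PySem.Dict.get?_insert_of_ne last i hv, posFrom_cons]
          have hxv : ¬ x = v := fun h => hv h.symm
          simp [hxv]
    | none =>
      simp only [ih (i + 1) (last.insert x i)]
      apply forall_congr'
      intro v
      by_cases hv : v = x
      · subst hv
        rw [PySem.Dict.get?_insert_self, hx, posFrom_cons]
        simp [optList]
      · rw [PySem.Dict.get?_insert_of_ne last i hv, posFrom_cons]
        have hxv : ¬ x = v := fun h => hv h.symm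
        simp [hxv]

theorem B_iff (array : List Int) (k : Int) :
    identical_elements_iterative_alt array k = true ↔ GapOk array k := by
  unfold identical_elements_iterative_alt
  rw [goB_iff]
  apply forall_congr'
  intro v
  rw [PySem.Dict.get?_empty]
  rfl

-- ===== VERDICT (by name: the statement is the Claim_ definition above) =====
theorem identical_elements_iterative_spec : Claim_equal_identical_elements_iterative := by
  intro array k _
  unfold Spec_identical_elements_iterative
  rw [Bool.eq_iff_iff, A_iff, B_iff]
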